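-- pv_equiv track=rewrite | github.com/geneontology/go-pombase | pombase_direct_bp_annots_query.py | cluster_pair_list
-- ===== SOURCE A (Python) =====
-- def cluster_pair_list(result_sets):
--     clusters = []
--     used_terms = set()  # Track used_terms
--     # Sort result_sets (pairs) by # of common genes?
--     result_sets = sorted(result_sets, key=lambda x: x[2], reverse=True)
--     for r_set in result_sets:
--         c_index = 0
--         cluster_found = False
--         term1 = r_set[0]
--         term2 = r_set[1]
--         if term1 in used_terms and term2 in used_terms:
--             continue
--         for cluster in clusters:
--             if term1 in cluster and term2 in cluster:
--                 cluster_found = True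
--                 break
--             elif term1 in cluster:
--                 if term2 not in cluster:
--                     clusters[c_index].append(term2)
--                     cluster_found = True
--                     break
--             elif term2 in cluster:
--                 if term1 not in cluster:
--                     clusters[c_index].append(term1)
--                     cluster_found = True
--                     break
--             c_index += 1
--         if not cluster_found:
--             clusters.append([term1, term2])
--         used_terms.add(term1), used_terms.add(term2)
--     return clusters
-- ===== SOURCE B (Python) =====
-- def cluster_pair_list(result_sets):
--     clusters = []
--     cluster_of = {}  # term -> index of the unique cluster containing it
--     for term1, term2, _ in sorted(result_sets, key=lambda x: x[2], reverse=True):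
--         i1 = cluster_of.get(term1)
--         i2 = cluster_of.get(term2)
--         if i1 is not None and i2 is not None:
--             continue
--         if i1 is not None:
--             clusters[i1].append(term2)
--             cluster_of[term2] = i1
--         elif i2 is not None:
--             clusters[i2].append(term1)
--             cluster_of[term1] = i2
--         else:
--             clusters.append([term1, term2])
--             cluster_of[term1] = cluster_of[term2] = len(clusters) - 1
--     return clusters
-- ===== Notes on version B (the rewrite author's own statement) =====
-- stated objective: faster
-- what changed: B replaces A's inner scan over all clusters (and the per-cluster 'in' list tests) by a dict mapping each term to the index of its unique cluster, so each pair is handled in O(1) after the sort.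
import Mathlib
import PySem

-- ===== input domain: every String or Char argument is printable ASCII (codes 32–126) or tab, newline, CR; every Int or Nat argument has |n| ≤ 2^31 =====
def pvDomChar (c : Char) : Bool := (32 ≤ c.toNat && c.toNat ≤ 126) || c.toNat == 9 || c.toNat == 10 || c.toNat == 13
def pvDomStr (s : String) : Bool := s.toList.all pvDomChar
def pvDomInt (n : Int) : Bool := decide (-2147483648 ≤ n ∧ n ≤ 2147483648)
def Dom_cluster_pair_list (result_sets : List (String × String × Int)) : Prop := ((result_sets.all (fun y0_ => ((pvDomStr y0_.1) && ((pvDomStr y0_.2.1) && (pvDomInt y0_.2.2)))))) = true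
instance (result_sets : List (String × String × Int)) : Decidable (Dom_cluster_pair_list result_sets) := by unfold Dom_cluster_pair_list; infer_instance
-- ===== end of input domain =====

-- B replaces A's inner scan over all clusters by a dict term → cluster index
-- (each term lives in exactly one cluster), one O(1) step per pair after the sort.

-- ===== PORT A =====
-- A's inner 'for cluster in clusters' loop: returns the updated clusters list and cluster_found.
def pvLoopA (t1 t2 : String) : List (List String) → List (List String) × Bool
  | [] => ([], false)
  | c :: rest =>
    if t1 ∈ c ∧ t2 ∈ c then (c :: rest, true)
    else if t1 ∈ c then
      if t2 ∉ c then ((c ++ [t2]) :: rest, true)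
      else
        let p := pvLoopA t1 t2 rest
        (c :: p.1, p.2)
    else if t2 ∈ c then
      if t1 ∉ c then ((c ++ [t1]) :: rest, true)
      else
        let p := pvLoopA t1 t2 rest
        (c :: p.1, p.2)
    else
      let p := pvLoopA t1 t2 rest
      (c :: p.1, p.2)

-- one iteration of A's outer loop; state = (clusters, used_terms)
def pvStepA (st : List (List String) × PySem.Set String) (r : String × String × Int) :
    List (List String) × PySem.Set String :=
  if st.2.contains r.1 && st.2.contains r.2.1 then st
  else
    let p := pvLoopA r.1 r.2.1 st.1
    let cs := if p.2 then p.1 else p.1 ++ [[r.1, r.2.1]]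
    (cs, PySem.Set.add (PySem.Set.add st.2 r.1) r.2.1)

def cluster_pair_list (result_sets : List (String × String × Int)) : List (List String) :=
  ((PySem.List.sorted result_sets (fun x => x.2.2) true).foldl pvStepA
    ([], PySem.Set.empty)).1

-- ===== PORT B =====
-- one iteration of B's loop; state = (clusters, cluster_of : term → index of its cluster)
def pvStepB (st : List (List String) × PySem.Dict String Nat) (r : String × String × Int) :
    List (List String) × PySem.Dict String Nat :=
  match st.2.get? r.1, st.2.get? r.2.1 with
  | some _, some _ => st
  | some i, none => (st.1.modify i (· ++ [r.2.1]), st.2.insert r.2.1 i)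
  | none, some i => (st.1.modify i (· ++ [r.1]), st.2.insert r.1 i)
  | none, none =>
      (st.1 ++ [[r.1, r.2.1]],
       (st.2.insert r.1 st.1.length).insert r.2.1 st.1.length)

def cluster_pair_list_alt (result_sets : List (String × String × Int)) : List (List String) :=
  ((PySem.List.sorted result_sets (fun x => x.2.2) true).foldl pvStepB
    ([], PySem.Dict.empty)).1

-- ===== PRECONDITION & SPEC =====
def Spec_cluster_pair_list (result_sets : List (String × String × Int)) (out : List (List String)) : Prop := out = cluster_pair_list_alt result_sets
instance (result_sets : List (String × String × Int)) (out : List (List String)) : Decidable (Spec_cluster_pair_list result_sets out) := by unfold Spec_cluster_pair_list; infer_instance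

-- ===== CLAIM (what is proved, stated in full; the proofs are below) =====
def Claim_equal_cluster_pair_list : Prop := ∀ (result_sets : List (String × String × Int)), Dom_cluster_pair_list result_sets → Spec_cluster_pair_list result_sets (cluster_pair_list result_sets)

-- ===== LEMMAS AND PROOFS =====

-- The invariant tying A's state (clusters, used) to B's state (clusters, idx):
-- used = dom idx, and idx maps each term to the unique cluster containing it.
def pvInv (clusters : List (List String)) (used : PySem.Set String)
    (idx : PySem.Dict String Nat) : Prop :=
  (∀ t, t ∈ used ↔ (idx.get? t).isSome) ∧
  (∀ t i, idx.get? t = some i → ∃ h : i < clusters.length, t ∈ clusters[i]) ∧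
  (∀ t j, (h : j < clusters.length) → t ∈ clusters[j] → idx.get? t = some j)

lemma pvLoopA_none (t1 t2 : String) (clusters : List (List String))
    (h1 : ∀ c ∈ clusters, t1 ∉ c) (h2 : ∀ c ∈ clusters, t2 ∉ c) :
    pvLoopA t1 t2 clusters = (clusters, false) := by
  induction clusters with
  | nil => rfl
  | cons c rest ih =>
    have n1 := h1 c (by simp)
    have n2 := h2 c (by simp)
    simp only [pvLoopA]
    rw [if_neg (by tauto), if_neg n1, if_neg n2,
      ih (fun c hc => h1 c (by simp [hc])) (fun c hc => h2 c (by simp [hc]))]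

lemma pvLoopA_found1 (t1 t2 : String) (clusters : List (List String)) (i : Nat)
    (hi : i < clusters.length) (hmem : t1 ∈ clusters[i])
    (huniq : ∀ j, (h : j < clusters.length) → t1 ∈ clusters[j] → j = i)
    (h2 : ∀ c ∈ clusters, t2 ∉ c) :
    pvLoopA t1 t2 clusters = (clusters.modify i (· ++ [t2]), true) := by
  induction clusters generalizing i with
  | nil => simp at hi
  | cons c rest ih =>
    have n2 := h2 c (by simp)
    cases i with
    | zero =>
      have m1 : t1 ∈ c := by simpa using hmem
      simp only [pvLoopA]
      rw [if_neg (by tauto), if_pos m1, if_pos n2]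
      rfl
    | succ i =>
      have n1 : t1 ∉ c := by
        intro hm
        exact absurd (huniq 0 (by simp) (by simpa using hm)) (by simp)
      simp only [pvLoopA]
      rw [if_neg (by tauto), if_neg n1, if_neg n2,
        ih i (by simpa using hi) (by simpa using hmem)
          (fun j hj hm => by
            have := huniq (j+1) (by simpa using Nat.succ_lt_succ hj) (by simpa using hm)
            omega)
          (fun c hc => h2 c (by simp [hc]))]
      rfl

lemma pvLoopA_found2 (t1 t2 : String) (clusters : List (List String)) (i : Nat)
    (hi : i < clusters.length) (hmem : t2 ∈ clusters[i])
    (huniq : ∀ j, (h : j < clusters.length) → t2 ∈ clusters[j] → j = i)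
    (h1 : ∀ c ∈ clusters, t1 ∉ c) :
    pvLoopA t1 t2 clusters = (clusters.modify i (· ++ [t1]), true) := by
  induction clusters generalizing i with
  | nil => simp at hi
  | cons c rest ih =>
    have n1 := h1 c (by simp)
    cases i with
    | zero =>
      have m2 : t2 ∈ c := by simpa using hmem
      simp only [pvLoopA]
      rw [if_neg (by tauto), if_neg n1, if_pos m2, if_pos n1]
      rfl
    | succ i =>
      have n2 : t2 ∉ c := by
        intro hm
        exact absurd (huniq 0 (by simp) (by simpa using hm)) (by simp)
      simp only [pvLoopA]
      rw [if_neg (by tauto), if_neg n1, if_neg n2,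
        ih i (by simpa using hi) (by simpa using hmem)
          (fun j hj hm => by
            have := huniq (j+1) (by simpa using Nat.succ_lt_succ hj) (by simpa using hm)
            omega)
          (fun c hc => h1 c (by simp [hc]))]
      rfl

-- a term in no cluster, from its absence in the index
lemma pvNotIn (cl : List (List String)) (used : PySem.Set String) (idx : PySem.Dict String Nat)
    (hInv : pvInv cl used idx) (t : String) (hg : idx.get? t = none) :
    ∀ c ∈ cl, t ∉ c := by
  intro c hc hm
  obtain ⟨j, hj, rfl⟩ := List.mem_iff_getElem.mp hc
  exact absurd (hInv.2.2 t j hj hm) (by simp [hg])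

-- invariant preservation: append tNew to the cluster of tOld
lemma pvInv_mod (cl : List (List String)) (used used' : PySem.Set String)
    (idx : PySem.Dict String Nat) (hInv : pvInv cl used idx)
    (tOld tNew : String) (i : Nat)
    (hOld : idx.get? tOld = some i) (hNew : idx.get? tNew = none)
    (hU' : ∀ t, t ∈ used' ↔ t = tOld ∨ t = tNew ∨ t ∈ used) :
    pvInv (cl.modify i (· ++ [tNew])) used' (idx.insert tNew i) := by
  obtain ⟨hU, hI1, hI2⟩ := hInv
  obtain ⟨hi, hmem⟩ := hI1 tOld i hOld
  refine ⟨?_, ?_, ?_⟩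
  · intro t
    rw [hU' t, PySem.Dict.get?_insert]
    by_cases h2 : t = tNew <;> by_cases h1 : t = tOld <;>
      simp [h1, h2, hU t, hOld]
  · intro t j hg
    rw [PySem.Dict.get?_insert] at hg
    by_cases h2 : t = tNew
    · rw [if_pos h2] at hg
      injection hg with hg
      subst hg
      refine ⟨by simpa using hi, ?_⟩
      simp [h2]
    · rw [if_neg h2] at hg
      obtain ⟨hj, hm⟩ := hI1 t j hg
      refine ⟨by simpa using hj, ?_⟩
      simp only [List.getElem_modify]
      split <;> simp_all
  · intro t j hj hm
    have hj' : j < cl.length := by simpa using hj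
    simp only [List.getElem_modify] at hm
    rw [PySem.Dict.get?_insert]
    split at hm
    · rename_i hij
      subst hij
      rcases List.mem_append.mp hm with hm | hm
      · have := hI2 t i hi hm
        have hne : t ≠ tNew := fun h => by rw [h, hNew] at this; simp at this
        rw [if_neg hne]
        exact this
      · have : t = tNew := by simpa using hm
        simp [this]
    · rename_i hij
      have := hI2 t j hj' hm
      have hne : t ≠ tNew := fun h => by rw [h, hNew] at this; simp at this
      rw [if_neg hne]
      exact this

-- invariant preservation: a fresh cluster [t1, t2]
lemma pvInv_app (cl : List (List String)) (used used' : PySem.Set String)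
    (idx : PySem.Dict String Nat) (hInv : pvInv cl used idx)
    (t1 t2 : String) (hg1 : idx.get? t1 = none) (hg2 : idx.get? t2 = none)
    (hU' : ∀ t, t ∈ used' ↔ t = t1 ∨ t = t2 ∨ t ∈ used) :
    pvInv (cl ++ [[t1, t2]]) used'
      ((idx.insert t1 cl.length).insert t2 cl.length) := by
  obtain ⟨hU, hI1, hI2⟩ := hInv
  refine ⟨?_, ?_, ?_⟩
  · intro t
    rw [hU' t, PySem.Dict.get?_insert, PySem.Dict.get?_insert]
    by_cases h2 : t = t2 <;> by_cases h1 : t = t1 <;>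
      simp [h1, h2, hU t]
  · intro t j hg
    rw [PySem.Dict.get?_insert, PySem.Dict.get?_insert] at hg
    by_cases h2 : t = t2
    · rw [if_pos h2] at hg
      injection hg with hg
      subst hg
      refine ⟨by simp, ?_⟩
      rw [List.getElem_concat_length]
      · simp [h2]
      · rfl
    · rw [if_neg h2] at hg
      by_cases h1 : t = t1
      · rw [if_pos h1] at hg
        injection hg with hg
        subst hg
        refine ⟨by simp, ?_⟩
        rw [List.getElem_concat_length]
        · simp [h1]
        · rfl
      · rw [if_neg h1] at hg
        obtain ⟨hj, hm⟩ := hI1 t j hg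
        refine ⟨by simp; omega, ?_⟩
        rw [List.getElem_append_left hj]
        exact hm
  · intro t j hj hm
    have hj' : j < cl.length + 1 := by simpa using hj
    rw [PySem.Dict.get?_insert, PySem.Dict.get?_insert]
    rcases Nat.lt_succ_iff_lt_or_eq.mp hj' with hlt | rfl
    · rw [List.getElem_append_left hlt] at hm
      have := hI2 t j hlt hm
      have hn2 : t ≠ t2 := fun h => by rw [h, hg2] at this; simp at this
      have hn1 : t ≠ t1 := fun h => by rw [h, hg1] at this; simp at this
      rw [if_neg hn2, if_neg hn1]
      exact this
    · rw [List.getElem_concat_length] at hm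
      · rcases (by simpa using hm : t = t1 ∨ t = t2) with h | h <;> simp [h]
      · rfl

lemma pvStep_eq (stA : List (List String) × PySem.Set String)
    (stB : List (List String) × PySem.Dict String Nat)
    (hcl : stA.1 = stB.1) (hInv : pvInv stB.1 stA.2 stB.2)
    (r : String × String × Int) :
    (pvStepA stA r).1 = (pvStepB stB r).1 ∧
      pvInv (pvStepB stB r).1 (pvStepA stA r).2 (pvStepB stB r).2 := by
  obtain ⟨cA, used⟩ := stA
  obtain ⟨cl, idx⟩ := stB
  obtain ⟨t1, t2, w⟩ := r
  dsimp at hcl hInv ⊢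
  subst hcl
  have hmemc : ∀ x : String, used.contains x = true ↔ x ∈ used := by
    intro x; simp [PySem.Set.contains]
  have hUa : ∀ t, t ∈ used ↔ (idx.get? t).isSome := hInv.1
  rcases hg1 : idx.get? t1 with _ | i1 <;> rcases hg2 : idx.get? t2 with _ | i2
  · -- both unused: fresh cluster
    have hc1 : used.contains t1 = false := by
      rw [Bool.eq_false_iff, Ne, hmemc, hUa, hg1]; simp
    have hA : pvStepA (cA, used) (t1, t2, w) =
        (cA ++ [[t1, t2]], PySem.Set.add (PySem.Set.add used t1) t2) := by
      simp only [pvStepA, hc1, Bool.false_and, Bool.false_eq_true, if_false]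
      rw [pvLoopA_none t1 t2 cA (pvNotIn cA used idx hInv t1 hg1)
        (pvNotIn cA used idx hInv t2 hg2)]
      rfl
    have hB : pvStepB (cA, idx) (t1, t2, w) =
        (cA ++ [[t1, t2]], (idx.insert t1 cA.length).insert t2 cA.length) := by
      simp only [pvStepB, hg1, hg2]
    rw [hA, hB]
    exact ⟨rfl, pvInv_app cA used _ idx hInv t1 t2 hg1 hg2
      (fun t => by simp [PySem.Set.mem_add]; tauto)⟩
  · -- t2 clustered, t1 fresh: append t1 to t2's cluster
    have hc1 : used.contains t1 = false := by
      rw [Bool.eq_false_iff, Ne, hmemc, hUa, hg1]; simp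
    obtain ⟨hi, hmem⟩ := hInv.2.1 t2 i2 hg2
    have hA : pvStepA (cA, used) (t1, t2, w) =
        (cA.modify i2 (· ++ [t1]), PySem.Set.add (PySem.Set.add used t1) t2) := by
      simp only [pvStepA, hc1, Bool.false_and, Bool.false_eq_true, if_false]
      rw [pvLoopA_found2 t1 t2 cA i2 hi hmem
        (fun j hj hm => by
          have := hInv.2.2 t2 j hj hm
          rw [hg2] at this
          exact (by simpa using this : i2 = j).symm)
        (pvNotIn cA used idx hInv t1 hg1)]
      rfl
    have hB : pvStepB (cA, idx) (t1, t2, w) =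
        (cA.modify i2 (· ++ [t1]), idx.insert t1 i2) := by
      simp only [pvStepB, hg1, hg2]
    rw [hA, hB]
    exact ⟨rfl, pvInv_mod cA used _ idx hInv t2 t1 i2 hg2 hg1
      (fun t => by simp [PySem.Set.mem_add]; tauto)⟩
  · -- t1 clustered, t2 fresh: append t2 to t1's cluster
    have hc2 : used.contains t2 = false := by
      rw [Bool.eq_false_iff, Ne, hmemc, hUa, hg2]; simp
    obtain ⟨hi, hmem⟩ := hInv.2.1 t1 i1 hg1
    have hA : pvStepA (cA, used) (t1, t2, w) =
        (cA.modify i1 (· ++ [t2]), PySem.Set.add (PySem.Set.add used t1) t2) := by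
      simp only [pvStepA, hc2, Bool.and_false, Bool.false_eq_true, if_false]
      rw [pvLoopA_found1 t1 t2 cA i1 hi hmem
        (fun j hj hm => by
          have := hInv.2.2 t1 j hj hm
          rw [hg1] at this
          exact (by simpa using this : i1 = j).symm)
        (pvNotIn cA used idx hInv t2 hg2)]
      rfl
    have hB : pvStepB (cA, idx) (t1, t2, w) =
        (cA.modify i1 (· ++ [t2]), idx.insert t2 i1) := by
      simp only [pvStepB, hg1, hg2]
    rw [hA, hB]
    exact ⟨rfl, pvInv_mod cA used _ idx hInv t1 t2 i1 hg1 hg2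
      (fun t => by simp [PySem.Set.mem_add]; tauto)⟩
  · -- both already clustered: skip
    have hc1 : used.contains t1 = true := by rw [hmemc, hUa, hg1]; simp
    have hc2 : used.contains t2 = true := by rw [hmemc, hUa, hg2]; simp
    have hA : pvStepA (cA, used) (t1, t2, w) = (cA, used) := by
      simp only [pvStepA, hc1, hc2, Bool.and_self, if_true]
    have hB : pvStepB (cA, idx) (t1, t2, w) = (cA, idx) := by
      simp only [pvStepB, hg1, hg2]
    rw [hA, hB]
    exact ⟨rfl, hInv⟩

lemma pvFold_eq (l : List (String × String × Int))
    (stA : List (List String) × PySem.Set String)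
    (stB : List (List String) × PySem.Dict String Nat)
    (hcl : stA.1 = stB.1) (hInv : pvInv stB.1 stA.2 stB.2) :
    (l.foldl pvStepA stA).1 = (l.foldl pvStepB stB).1 := by
  induction l generalizing stA stB with
  | nil => simpa using hcl
  | cons r rest ih =>
    obtain ⟨h1, h2⟩ := pvStep_eq stA stB hcl hInv r
    exact ih (pvStepA stA r) (pvStepB stB r) h1 h2

-- ===== VERDICT (by name: the statement is the Claim_ definition above) =====
theorem cluster_pair_list_spec : Claim_equal_cluster_pair_list := by
  intro rs _
  unfold Spec_cluster_pair_list cluster_pair_list cluster_pair_list_alt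
  exact pvFold_eq _ ([], PySem.Set.empty) ([], PySem.Dict.empty) rfl
    ⟨fun t => by simp [PySem.Dict.empty, PySem.Dict.get?, PySem.Set.empty],
     fun t i h => by simp [PySem.Dict.empty, PySem.Dict.get?] at h,
     fun t j h => by simp at h⟩
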